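-- pv_equiv track=rewrite | github.com/jialai/SequencePatternMining | TransferToSetOfSequences.py | prefixSpan
-- ===== SOURCE A (Python) =====
-- import copy
-- from collections import defaultdict
--
-- def projectSequence(sequence, prefix, newEvent):
--     result = None
--     for i, itemset in enumerate(sequence):
--         if result is None:
--             if (not newEvent) or i > 0:
--                 if (all(x in itemset for x in prefix)):
--                     result = [list(itemset)]
--         else:
--             result.append(copy.copy(itemset))
--     return result
--
-- def projectDatabase(dataset, prefix, newEvent):
--     projectedDB = []
--     for sequence in dataset:
--         seqProjected = projectSequence(sequence, prefix, newEvent)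
--         if not seqProjected is None:
--             projectedDB.append(seqProjected)
--     return projectedDB
--
-- def generateItemSupports(dataset, ignoreFirstEvent=False, prefix=[]):
--     result = defaultdict(int)
--     for sequence in dataset:
--         if ignoreFirstEvent:
--             sequence = sequence[1:]
--         cooccurringItems = set()
--         for itemset in sequence:
--             if all(x in itemset for x in prefix):
--                 for item in itemset:
--                     if not item in prefix:
--                         cooccurringItems.add(item)
--         for item in cooccurringItems:
--             result [item] += 1
--     return sorted(result.items())
--
-- def prefixSpan(dataset, minSupport):
--     result = []
--     itemCounts = generateItemSupports(dataset)
--     for item, count in itemCounts: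
--         if count >= minSupport:
--             newPrefix = [[item]]
--             result.append((newPrefix, count))
--             result.extend(prefixSpanInternal(projectDatabase(dataset, [item], False), minSupport, newPrefix))
--     return result
--
-- def prefixSpanInternal(dataset, minSupport, prevPrefixes=[]):
--     result = []
--
--     # Add a new item to the last element (==same time)
--     itemCountSameEvent = generateItemSupports(dataset, False, prefix=prevPrefixes[-1])
--     for item, count in itemCountSameEvent:
--         if (count >= minSupport) and item > prevPrefixes[-1][-1]:
--             newPrefix = copy.deepcopy(prevPrefixes)
--             newPrefix[-1].append(item)
--             result.append((newPrefix, count))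
--             result.extend(prefixSpanInternal(projectDatabase(dataset, newPrefix[-1], False), minSupport, newPrefix))
--
--     # Add a new event to the prefix
--     itemCountSubsequentEvents = generateItemSupports(dataset, True)
--     for item, count in itemCountSubsequentEvents:
--         if count >= minSupport:
--             newPrefix = copy.deepcopy(prevPrefixes)
--             newPrefix.append([item])
--             result.append((newPrefix, count))
--             result.extend(prefixSpanInternal(projectDatabase(dataset, [item], True), minSupport, newPrefix))
--     return result
-- ===== SOURCE B (Python) =====
-- def prefixSpan(dataset, minSupport):
--     # Pseudo-projection PrefixSpan: projected databases are (sequence_index, start_offset)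
--     # pointers into the original dataset; nothing is ever copied per recursion level.
--     def supports(entries, skip, prefix):
--         counts = {}
--         for si, start in entries:
--             seq = dataset[si]
--             seen = set()
--             for itemset in seq[start + skip:]:
--                 if all(x in itemset for x in prefix):
--                     for item in itemset:
--                         if item not in prefix:
--                             seen.add(item)
--             for item in seen:
--                 counts[item] = counts.get(item, 0) + 1
--         return sorted(counts.items())
--
--     def project(entries, prefix, off):
--         out = []
--         for si, start in entries:
--             seq = dataset[si]
--             j = start + off
--             while j < len(seq) and not all(x in seq[j] for x in prefix):
--                 j += 1
--             if j < len(seq):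
--                 out.append((si, j))
--         return out
--
--     def mine(entries, prefix):
--         result = []
--         last = prefix[-1]
--         for item, count in supports(entries, 0, last):
--             if count >= minSupport and item > last[-1]:
--                 newPrefix = prefix[:-1] + [last + [item]]
--                 result.append((newPrefix, count))
--                 result.extend(mine(project(entries, last + [item], 0), newPrefix))
--         for item, count in supports(entries, 1, []):
--             if count >= minSupport:
--                 newPrefix = prefix + [[item]]
--                 result.append((newPrefix, count))
--                 result.extend(mine(project(entries, [item], 1), newPrefix))
--         return result
--
--     result = []
--     entries0 = [(i, 0) for i in range(len(dataset))]
--     for item, count in supports(entries0, 0, []):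
--         if count >= minSupport:
--             result.append(([[item]], count))
--             result.extend(mine(project(entries0, [item], 0), [[item]]))
--     return result
-- ===== Notes on version B (the rewrite author's own statement) =====
-- stated objective: alternative
-- what changed: Replaces A's physical database projection (recursively rebuilding copied nested-list projected databases, deepcopying prefixes) by pseudo-projection: the projected database is a list of (sequence_index, start_offset) pointers into the original dataset; support counting scans suffixes from the pointers and projection just advances a pointer past the first itemset containing the prefix, with the same recursion order so the emitted (prefix, count) list is identical.
import Mathlib
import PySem

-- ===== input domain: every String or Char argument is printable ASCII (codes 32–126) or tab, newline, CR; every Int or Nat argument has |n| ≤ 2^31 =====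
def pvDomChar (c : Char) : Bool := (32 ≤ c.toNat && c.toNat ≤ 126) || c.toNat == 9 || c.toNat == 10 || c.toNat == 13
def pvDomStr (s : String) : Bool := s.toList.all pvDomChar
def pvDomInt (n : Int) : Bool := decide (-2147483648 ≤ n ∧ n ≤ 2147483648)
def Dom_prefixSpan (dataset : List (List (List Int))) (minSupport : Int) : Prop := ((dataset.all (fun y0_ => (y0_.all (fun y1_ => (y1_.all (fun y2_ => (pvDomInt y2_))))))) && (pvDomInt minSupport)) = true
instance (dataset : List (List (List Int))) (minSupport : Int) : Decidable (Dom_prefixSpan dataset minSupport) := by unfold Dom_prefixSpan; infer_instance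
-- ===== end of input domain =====

-- B replaces A's physically copied projected databases by (sequence_index, start_offset)
-- pointers into the original dataset (pseudo-projection); same recursion order, same output.


-- fuel used as a totality guard for the (well-founded but intricate) recursion of BOTH
-- ports; it over-approximates the recursion depth: each new-event projection strictly
-- shrinks the total itemset count and each same-event chain adds strictly increasing
-- items that occur in the data.
def pvFuel (dataset : List (List (List Int))) : Nat :=
  ((dataset.map List.length).sum + 2) * ((dataset.map (fun s => (s.map List.length).sum)).sum + 2)

-- ===== PORT A =====
-- projectSequence: loop over enumerate(sequence) carrying `result : Option`
-- the loop body: `result` is None until the first admissible matching itemset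
def pvStepA (newEvent : Bool) (pre : List Int) (result : Option (List (List Int)))
    (p : Int × List Int) : Option (List (List Int)) :=
  match result with
  | none =>
      if ((!newEvent) || decide ((0:Int) < p.1)) && pre.all (fun x => p.2.contains x)
      then some [p.2] else none
  | some l => some (l ++ [p.2])

def projectSequenceA (sequence : List (List Int)) (pre : List Int) (newEvent : Bool) :
    Option (List (List Int)) :=
  (PySem.List.enumerate sequence 0).foldl (pvStepA newEvent pre) none

def projectDatabaseA (dataset : List (List (List Int))) (pre : List Int) (newEvent : Bool) :
    List (List (List Int)) :=
  dataset.foldl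
    (fun projectedDB sequence =>
      match projectSequenceA sequence pre newEvent with
      | none => projectedDB
      | some seqProjected => projectedDB ++ [seqProjected])
    []

-- generateItemSupports: defaultdict(int) of per-sequence co-occurring item sets, then
-- sorted(result.items()); sequence[1:] is ported as `.drop 1` (exact for this slice).
def generateItemSupportsA (dataset : List (List (List Int))) (ignoreFirstEvent : Bool)
    (pre : List Int) : List (Int × Int) :=
  let result : PySem.Dict Int Int :=
    dataset.foldl
      (fun result sequence =>
        let sequence := if ignoreFirstEvent then sequence.drop 1 else sequence
        let cooccurringItems : PySem.Set Int :=
          sequence.foldl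
            (fun s itemset =>
              if pre.all (fun x => itemset.contains x) then
                itemset.foldl
                  (fun s item => if item ∈ pre then s else PySem.Set.add s item) s
              else s)
            PySem.Set.empty
        -- Python iterates the hash set here; the per-key counts (hence the sorted
        -- item list below) do not depend on that order, so insertion order is exact.
        cooccurringItems.foldl (fun d item => d.modify item 0 (· + 1)) result)
      PySem.Dict.empty
  PySem.List.sorted2 result.items (·.1) (·.2)

def prefixSpanInternalA : Nat → List (List (List Int)) → Int → List (List Int) →
    List (List (List Int) × Int)
  | 0, _, _, _ => []
  | fuel+1, dataset, minSupport, prevPrefixes =>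
    -- prevPrefixes[-1] / prevPrefixes[-1][-1]; nonempty at every call site, pyGetD exact
    let last := PySem.List.pyGetD prevPrefixes (-1) []
    let lastItem := PySem.List.pyGetD last (-1) 0
    let r1 := (generateItemSupportsA dataset false last).foldl
      (fun result ic =>
        if decide (minSupport ≤ ic.2) && decide (lastItem < ic.1) then
          -- deepcopy + newPrefix[-1].append(item), functionally
          let newPrefix := prevPrefixes.dropLast ++ [last ++ [ic.1]]
          result ++ [(newPrefix, ic.2)] ++
            prefixSpanInternalA fuel (projectDatabaseA dataset (last ++ [ic.1]) false)
              minSupport newPrefix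
        else result) []
    (generateItemSupportsA dataset true []).foldl
      (fun result ic =>
        if decide (minSupport ≤ ic.2) then
          let newPrefix := prevPrefixes ++ [[ic.1]]
          result ++ [(newPrefix, ic.2)] ++
            prefixSpanInternalA fuel (projectDatabaseA dataset [ic.1] true)
              minSupport newPrefix
        else result) r1

def prefixSpan (dataset : List (List (List Int))) (minSupport : Int) :
    List (List (List Int) × Int) :=
  (generateItemSupportsA dataset false []).foldl
    (fun result ic =>
      if decide (minSupport ≤ ic.2) then
        result ++ [([[ic.1]], ic.2)] ++
          prefixSpanInternalA (pvFuel dataset) (projectDatabaseA dataset [ic.1] false)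
            minSupport [[ic.1]]
      else result) []

-- ===== PORT B =====
-- while j < len(seq) and not all(...): j += 1 — returns the final j if it found a match
def findFromB (seq : List (List Int)) (pre : List Int) (j : Nat) : Option Nat :=
  if h : j < seq.length then
    if pre.all (fun x => (seq.getD j []).contains x) then some j
    else findFromB seq pre (j + 1)
  else none
termination_by seq.length - j

-- support counting straight from the pointers; seq[start+skip:] ported as `.drop` (exact)
def supportsB (dataset : List (List (List Int))) (entries : List (Nat × Nat)) (skip : Nat)
    (pre : List Int) : List (Int × Int) :=
  let counts : PySem.Dict Int Int :=
    entries.foldl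
      (fun counts e =>
        let seq := dataset.getD e.1 []
        let seen : PySem.Set Int :=
          (seq.drop (e.2 + skip)).foldl
            (fun s itemset =>
              if pre.all (fun x => itemset.contains x) then
                itemset.foldl
                  (fun s item => if item ∈ pre then s else PySem.Set.add s item) s
              else s)
            PySem.Set.empty
        seen.foldl (fun d item => d.insert item (d.getD item 0 + 1)) counts)
      PySem.Dict.empty
  PySem.List.sorted2 counts.items (·.1) (·.2)

def projectB (dataset : List (List (List Int))) (entries : List (Nat × Nat))
    (pre : List Int) (off : Nat) : List (Nat × Nat) :=
  entries.foldl
    (fun out e =>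
      match findFromB (dataset.getD e.1 []) pre (e.2 + off) with
      | some j => out ++ [(e.1, j)]
      | none => out)
    []

def mineB : Nat → List (List (List Int)) → Int → List (Nat × Nat) → List (List Int) →
    List (List (List Int) × Int)
  | 0, _, _, _, _ => []
  | fuel+1, dataset, minSupport, entries, pfx =>
    let last := PySem.List.pyGetD pfx (-1) []
    let lastItem := PySem.List.pyGetD last (-1) 0
    let r1 := (supportsB dataset entries 0 last).foldl
      (fun result ic =>
        if decide (minSupport ≤ ic.2) && decide (lastItem < ic.1) then
          let newPrefix := pfx.dropLast ++ [last ++ [ic.1]]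
          result ++ [(newPrefix, ic.2)] ++
            mineB fuel dataset minSupport (projectB dataset entries (last ++ [ic.1]) 0)
              newPrefix
        else result) []
    (supportsB dataset entries 1 []).foldl
      (fun result ic =>
        if decide (minSupport ≤ ic.2) then
          let newPrefix := pfx ++ [[ic.1]]
          result ++ [(newPrefix, ic.2)] ++
            mineB fuel dataset minSupport (projectB dataset entries [ic.1] 1) newPrefix
        else result) r1

def prefixSpan_alt (dataset : List (List (List Int))) (minSupport : Int) :
    List (List (List Int) × Int) :=
  let entries0 := (List.range dataset.length).map (fun i => (i, 0))
  (supportsB dataset entries0 0 []).foldl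
    (fun result ic =>
      if decide (minSupport ≤ ic.2) then
        result ++ [([[ic.1]], ic.2)] ++
          mineB (pvFuel dataset) dataset minSupport (projectB dataset entries0 [ic.1] 0)
            [[ic.1]]
      else result) []

-- ===== PRECONDITION & SPEC =====
def Spec_prefixSpan (dataset : List (List (List Int))) (minSupport : Int) (out : List (List (List Int) × Int)) : Prop := out = prefixSpan_alt dataset minSupport
instance (dataset : List (List (List Int))) (minSupport : Int) (out : List (List (List Int) × Int)) : Decidable (Spec_prefixSpan dataset minSupport out) := by unfold Spec_prefixSpan; infer_instance

-- ===== CLAIM (what is proved, stated in full; the proofs are below) =====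
def Claim_equal_prefixSpan : Prop := ∀ (dataset : List (List (List Int))) (minSupport : Int), Dom_prefixSpan dataset minSupport → Spec_prefixSpan dataset minSupport (prefixSpan dataset minSupport)

-- ===== LEMMAS AND PROOFS =====
def pvView1 (dataset : List (List (List Int))) (e : Nat × Nat) : List (List Int) :=
  (dataset.getD e.1 []).drop e.2

def pvQ (pre : List Int) : List Int → Bool := fun t => pre.all (fun x => t.contains x)

theorem findFromB_eq_findIdx? (seq : List (List Int)) (pre : List Int) (j : Nat) :
    findFromB seq pre j = ((seq.drop j).findIdx? (pvQ pre)).map (j + ·) := by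
  rw [findFromB]
  split
  · rename_i h
    rw [List.drop_eq_getElem_cons h, List.findIdx?_cons, List.getD_eq_getElem seq [] h]
    show (if pvQ pre seq[j] then _ else _) = _
    split
    · simp
    · rw [findFromB_eq_findIdx? seq pre (j+1)]
      cases hx : (seq.drop (j+1)).findIdx? (pvQ pre) <;>
        simp [Nat.add_assoc, Nat.add_comm 1]
  · rename_i h
    rw [List.drop_eq_nil_of_le (by omega), List.findIdx?_nil]
    rfl
termination_by seq.length - j

theorem foldl_pvStepA_some (ne : Bool) (pre : List Int) (zs : List (Int × List Int))
    (l : List (List Int)) :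
    zs.foldl (pvStepA ne pre) (some l) = some (l ++ zs.map (·.2)) := by
  induction zs generalizing l with
  | nil => simp
  | cons z zs ih =>
      rw [List.foldl_cons]
      exact (ih (l ++ [z.2])).trans (by simp)

theorem foldl_pvStepA_none (ne : Bool) (pre : List Int) (t : List (List Int)) (s : Int)
    (hs : ne = false ∨ 0 < s) :
    (PySem.List.enumerate t s).foldl (pvStepA ne pre) none =
      (t.findIdx? (pvQ pre)).map (fun i => t.drop i) := by
  induction t generalizing s with
  | nil => simp [PySem.List.enumerate_nil]
  | cons x t ih =>
      rw [PySem.List.enumerate_cons, List.foldl_cons, List.findIdx?_cons]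
      have hcond : ((!ne) || decide ((0:Int) < s)) = true := by
        rcases hs with h | h <;> simp [h]
      have hstep : pvStepA ne pre none (s, x) =
          if pvQ pre x then some [x] else none := by
        simp [pvStepA, hcond, pvQ]
      rw [hstep]
      by_cases hq : pvQ pre x
      · rw [if_pos hq, if_pos hq, foldl_pvStepA_some, PySem.List.map_snd_enumerate]
        simp
      · rw [if_neg hq, if_neg hq, ih (s+1) (by rcases hs with h | h; exact .inl h; right; omega)]
        cases hx : t.findIdx? (pvQ pre) <;> simp

theorem projectSequenceA_eq (t : List (List Int)) (pre : List Int) (ne : Bool) :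
    projectSequenceA t pre ne =
      ((t.drop (if ne then 1 else 0)).findIdx? (pvQ pre)).map
        (fun i => t.drop ((if ne then 1 else 0) + i)) := by
  cases ne with
  | false =>
      simp only [projectSequenceA]
      rw [foldl_pvStepA_none _ _ _ _ (.inl rfl)]
      norm_num
  | true =>
      cases t with
      | nil => simp [projectSequenceA, PySem.List.enumerate_nil]
      | cons x t =>
          simp only [projectSequenceA]
          rw [PySem.List.enumerate_cons, List.foldl_cons]
          have hstep : pvStepA true pre none (0, x) = none := by simp [pvStepA]
          rw [hstep, foldl_pvStepA_none _ _ _ _ (.inr (by norm_num))]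
          norm_num
          cases hx : t.findIdx? (pvQ pre) <;> simp [Nat.add_comm 1]

theorem projectSequenceA_drop (seq : List (List Int)) (pre : List Int) (k : Nat) (ne : Bool) :
    projectSequenceA (seq.drop k) pre ne =
      (findFromB seq pre (k + (if ne then 1 else 0))).map (fun j => seq.drop j) := by
  rw [projectSequenceA_eq, findFromB_eq_findIdx?, List.drop_drop]
  cases hx : (seq.drop (k + (if ne then 1 else 0))).findIdx? (pvQ pre) <;>
    simp [List.drop_drop, Nat.add_assoc]

theorem projectDatabaseA_view_aux (dataset : List (List (List Int))) (E : List (Nat × Nat))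
    (pre : List Int) (ne : Bool) (acc : List (Nat × Nat)) :
    E.foldl (fun projectedDB e =>
        match projectSequenceA (pvView1 dataset e) pre ne with
        | none => projectedDB
        | some seqProjected => projectedDB ++ [seqProjected]) (acc.map (pvView1 dataset)) =
      (E.foldl (fun out e =>
        match findFromB (dataset.getD e.1 []) pre (e.2 + (if ne then 1 else 0)) with
        | some j => out ++ [(e.1, j)]
        | none => out) acc).map (pvView1 dataset) := by
  induction E generalizing acc with
  | nil => rfl
  | cons e E ih =>
      rw [List.foldl_cons, List.foldl_cons]
      have hs : projectSequenceA (pvView1 dataset e) pre ne =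
          (findFromB (dataset.getD e.1 []) pre (e.2 + (if ne then 1 else 0))).map
            (fun j => (dataset.getD e.1 []).drop j) :=
        projectSequenceA_drop (dataset.getD e.1 []) pre e.2 ne
      cases hf : findFromB (dataset.getD e.1 []) pre (e.2 + (if ne then 1 else 0)) with
      | none => rw [hs, hf]; exact ih acc
      | some j =>
          rw [hs, hf]
          show E.foldl _ ((acc.map (pvView1 dataset)) ++ [(dataset.getD e.1 []).drop j]) = _
          have hmap : (acc.map (pvView1 dataset)) ++ [(dataset.getD e.1 []).drop j] =
              (acc ++ [(e.1, j)]).map (pvView1 dataset) := by simp [pvView1]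
          rw [hmap]
          exact ih (acc ++ [(e.1, j)])

theorem projectDatabaseA_view (dataset : List (List (List Int))) (E : List (Nat × Nat))
    (pre : List Int) (ne : Bool) :
    projectDatabaseA (E.map (pvView1 dataset)) pre ne =
      (projectB dataset E pre (if ne then 1 else 0)).map (pvView1 dataset) := by
  rw [projectDatabaseA, projectB, List.foldl_map]
  exact projectDatabaseA_view_aux dataset E pre ne []

theorem generateItemSupportsA_view (dataset : List (List (List Int)))
    (E : List (Nat × Nat)) (ig : Bool) (pre : List Int) :
    generateItemSupportsA (E.map (pvView1 dataset)) ig pre =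
      supportsB dataset E (if ig then 1 else 0) pre := by
  simp only [generateItemSupportsA, supportsB]
  rw [List.foldl_map]
  congr 1
  congr 1
  congr 1
  funext d e
  cases ig
  · rfl
  · simp only [pvView1, if_true, List.drop_drop]
    rfl

theorem internal_eq_mine (fuel : Nat) (dataset : List (List (List Int))) (minSupport : Int)
    (E : List (Nat × Nat)) (pfx : List (List Int)) :
    prefixSpanInternalA fuel (E.map (pvView1 dataset)) minSupport pfx =
      mineB fuel dataset minSupport E pfx := by
  induction fuel generalizing E pfx with
  | zero => rfl
  | succ fuel ih =>
      simp only [prefixSpanInternalA, mineB]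
      have hv0 : generateItemSupportsA (E.map (pvView1 dataset)) false
            (PySem.List.pyGetD pfx (-1) []) =
          supportsB dataset E 0 (PySem.List.pyGetD pfx (-1) []) :=
        generateItemSupportsA_view dataset E false _
      have hv1 : generateItemSupportsA (E.map (pvView1 dataset)) true [] =
          supportsB dataset E 1 [] :=
        generateItemSupportsA_view dataset E true []
      rw [hv0, hv1]
      congr 1
      · funext result ic
        split_ifs with h
        · have hp : projectDatabaseA (E.map (pvView1 dataset)) [ic.1] true =
              (projectB dataset E [ic.1] 1).map (pvView1 dataset) :=
            projectDatabaseA_view dataset E _ true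
          rw [hp, ih]
        · rfl
      · congr 1
        funext result ic
        split_ifs with h
        · have hp : projectDatabaseA (E.map (pvView1 dataset))
              (PySem.List.pyGetD pfx (-1) [] ++ [ic.1]) false =
              (projectB dataset E (PySem.List.pyGetD pfx (-1) [] ++ [ic.1]) 0).map
                (pvView1 dataset) :=
            projectDatabaseA_view dataset E _ false
          rw [hp, ih]
        · rfl

theorem view_range (dataset : List (List (List Int))) :
    ((List.range dataset.length).map (fun i => (i, (0:Nat)))).map (pvView1 dataset) =
      dataset := by
  rw [List.map_map]
  apply List.ext_getElem (by simp)
  intro i h1 h2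
  simp [pvView1]
  rw [List.getElem?_eq_getElem h2]
  rfl


-- ===== VERDICT (by name: the statement is the Claim_ definition above) =====
theorem prefixSpan_spec : Claim_equal_prefixSpan := by
  intro dataset minSupport _
  unfold Spec_prefixSpan
  rw [prefixSpan]
  simp only [prefixSpan_alt]
  have hD : ((List.range dataset.length).map (fun i => (i, (0:Nat)))).map (pvView1 dataset) =
      dataset := view_range dataset
  conv_lhs => rw [← hD]
  have hv : generateItemSupportsA
        ((((List.range dataset.length).map (fun i => (i, (0:Nat))))).map (pvView1 dataset))
        false [] =
      supportsB dataset ((List.range dataset.length).map (fun i => (i, (0:Nat)))) 0 [] :=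
    generateItemSupportsA_view dataset _ false []
  rw [hv]
  congr 1
  funext result ic
  split_ifs with h
  · have hp : projectDatabaseA
        ((((List.range dataset.length).map (fun i => (i, (0:Nat))))).map (pvView1 dataset))
        [ic.1] false =
        (projectB dataset ((List.range dataset.length).map (fun i => (i, (0:Nat)))) [ic.1] 0).map
          (pvView1 dataset) :=
      projectDatabaseA_view dataset _ _ false
    rw [hp, hD, internal_eq_mine]
  · rfl
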